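-- pv_equiv track=rewrite | github.com/Jmitchell404/WTC_submission_004-problem | super_algos.py | possiblestringsRec
-- ===== SOURCE A (Python) =====
-- def possiblestringsRec(char_set, prefix, n, k, new_list):
--     """[Returns The function with the new list with 2 letters(a, b)]
--
--     Argument:
--         char_set : [how many intergers will be in the list]
--         prefix : [contains the intergers(a,b,aa,bb,etc)]
--         n : [length of the character_set]
--         k : [equals 0]
--         new_list : [empty list]
--
--     Returns:
--          [returns the empty list with intergers a,b till completion.]
--     """
--     if (k == 0) :
--         new_list.append(prefix)
--         return
--
--     for i in range(n):
--         newPrefix = prefix + (char_set[i])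
--         possiblestringsRec(char_set, newPrefix, n, k - 1, new_list)
--     return new_list
-- ===== SOURCE B (Python) =====
-- def possiblestringsRec(char_set, prefix, n, k, new_list):
--     # Iterative level-by-level construction instead of depth recursion;
--     # mutates new_list like the original (single append for k == 0, extend otherwise).
--     if (k == 0):
--         new_list.append(prefix)
--         return
--     frontier = [prefix]
--     for _ in range(k):
--         if not frontier:
--             break
--         frontier = [p + char_set[i] for p in frontier for i in range(n)]
--     new_list.extend(frontier)
--     return new_list
-- ===== Notes on version B (the rewrite author's own statement) =====
-- stated objective: alternative
-- what changed: Replaces the depth-first recursion with an iterative level-by-level (breadth-first) construction: a frontier list is expanded k times by one character and then appended to new_list in one extend.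
-- outside the precondition, e.g. on possiblestringsRec([], '', 0, -1, []): A returns [], B returns ['']
import Mathlib
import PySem

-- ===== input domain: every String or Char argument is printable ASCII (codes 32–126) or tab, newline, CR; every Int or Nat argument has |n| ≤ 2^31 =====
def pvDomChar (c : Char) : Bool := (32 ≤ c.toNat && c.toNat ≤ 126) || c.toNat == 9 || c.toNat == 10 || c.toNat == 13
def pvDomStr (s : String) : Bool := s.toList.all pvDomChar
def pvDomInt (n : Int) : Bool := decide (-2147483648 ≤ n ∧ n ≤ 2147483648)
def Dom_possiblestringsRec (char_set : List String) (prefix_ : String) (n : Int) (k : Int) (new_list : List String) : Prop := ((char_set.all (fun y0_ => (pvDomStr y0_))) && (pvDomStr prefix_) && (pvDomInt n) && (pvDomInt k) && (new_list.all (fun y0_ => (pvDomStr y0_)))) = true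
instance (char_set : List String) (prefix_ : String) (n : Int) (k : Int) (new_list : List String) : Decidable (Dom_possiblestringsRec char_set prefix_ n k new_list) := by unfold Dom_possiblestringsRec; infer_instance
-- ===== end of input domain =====

-- B replaces A's depth-first recursion by an iterative level-by-level frontier construction
-- (same return value and same mutation of new_list on all admitted inputs; equivalence below is
-- about the return value: none for k == 0, otherwise the final list).

-- ===== PORT A =====
-- Recursive core of A; fuel = k (A is only run with k ≥ 0 under Pre_, where the Int k matches
-- this Nat fuel exactly).  char_set[i] is in range under Pre_ (n ≤ len), so pyGetD is exact there.
def pvALoop (char_set : List String) (prefix_ : String) (n : Int) (k : Nat) (new_list : List String) : List String :=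
  match k with
  | 0 => new_list ++ [prefix_]                       -- if k == 0: new_list.append(prefix); return
  | Nat.succ k' =>
      (PySem.List.pyRange 0 n 1).foldl               -- for i in range(n):
        (fun acc i =>
          pvALoop char_set (prefix_ ++ PySem.List.pyGetD char_set i "") n k' acc) new_list

def possiblestringsRec (char_set : List String) (prefix_ : String) (n : Int) (k : Int) (new_list : List String) : Option (List String) :=
  if k = 0 then none                                 -- Python returns None here (after the append)
  else some (pvALoop char_set prefix_ n k.toNat new_list)

-- ===== PORT B =====
-- one frontier-expansion step: [p + char_set[i] for p in frontier for i in range(n)]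
def pvBStep (char_set : List String) (n : Int) (frontier : List String) : List String :=
  frontier.foldl
    (fun acc p =>
      (PySem.List.pyRange 0 n 1).foldl
        (fun acc i => acc ++ [p ++ PySem.List.pyGetD char_set i ""]) acc) []

-- the 'for _ in range(k)' loop with its early 'if not frontier: break'
def pvBIter (char_set : List String) (n : Int) (k : Nat) (frontier : List String) : List String :=
  match k with
  | 0 => frontier
  | Nat.succ k' =>
      if frontier = [] then frontier               -- if not frontier: break
      else pvBIter char_set n k' (pvBStep char_set n frontier)

def possiblestringsRec_alt (char_set : List String) (prefix_ : String) (n : Int) (k : Int) (new_list : List String) : Option (List String) :=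
  if k = 0 then none
  else some (new_list ++ pvBIter char_set n k.toNat [prefix_])   -- new_list.extend(frontier); return new_list

-- ===== PRECONDITION & SPEC =====
-- Pre_ excludes negative k — there A diverges by unbounded recursion when n > 0 (RecursionError)
-- and when n ≤ 0 returns new_list unchanged, a degenerate corner where B instead appends the
-- prefix — and k > 0 with n > len(char_set), where A raises IndexError.
def Pre_possiblestringsRec (char_set : List String) (prefix_ : String) (n : Int) (k : Int) (new_list : List String) : Prop :=
  0 ≤ k ∧ (k = 0 ∨ n ≤ (char_set.length : Int))
instance (char_set : List String) (prefix_ : String) (n : Int) (k : Int) (new_list : List String) : Decidable (Pre_possiblestringsRec char_set prefix_ n k new_list) := by unfold Pre_possiblestringsRec; infer_instance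

def pvWitness_possiblestringsRec : List String × String × Int × Int × List String := (["a", "b"], "", 2, 2, [])

def Spec_possiblestringsRec (char_set : List String) (prefix_ : String) (n : Int) (k : Int) (new_list : List String) (out : Option (List String)) : Prop := out = possiblestringsRec_alt char_set prefix_ n k new_list
instance (char_set : List String) (prefix_ : String) (n : Int) (k : Int) (new_list : List String) (out : Option (List String)) : Decidable (Spec_possiblestringsRec char_set prefix_ n k new_list out) := by unfold Spec_possiblestringsRec; infer_instance

-- ===== CLAIM (what is proved, stated in full; the proofs are below) =====
def Claim_equal_possiblestringsRec : Prop := ∀ (char_set : List String) (prefix_ : String) (n : Int) (k : Int) (new_list : List String), Dom_possiblestringsRec char_set prefix_ n k new_list → Pre_possiblestringsRec char_set prefix_ n k new_list → Spec_possiblestringsRec char_set prefix_ n k new_list (possiblestringsRec char_set prefix_ n k new_list)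

-- ===== LEMMAS AND PROOFS =====

-- foldl that only appends is independent of the accumulator
theorem pvFoldl_shift (r : List Int) (g : Int → List String) (acc : List String) :
    r.foldl (fun a i => a ++ g i) acc = acc ++ r.flatMap g :=
  PySem.List.foldl_append_eq_flatMap g r acc

-- pvALoop accumulates on the left: the generated strings are independent of the accumulator
theorem pvALoop_acc (cs : List String) (n : Int) :
    ∀ (k : Nat) (p : String) (acc : List String),
      pvALoop cs p n k acc = acc ++ pvALoop cs p n k [] := by
  intro k
  induction k with
  | zero => intro p acc; simp [pvALoop]
  | succ k' ih =>
    intro p acc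
    show (PySem.List.pyRange 0 n 1).foldl _ acc = acc ++ (PySem.List.pyRange 0 n 1).foldl _ []
    rw [PySem.List.foldl_congr_mem _ _
          (fun a i => a ++ pvALoop cs (p ++ PySem.List.pyGetD cs i "") n k' []) acc
          (fun a i _ => ih _ a),
        PySem.List.foldl_congr_mem _ _
          (fun a i => a ++ pvALoop cs (p ++ PySem.List.pyGetD cs i "") n k' []) []
          (fun a i _ => ih _ a),
        pvFoldl_shift, pvFoldl_shift]
    simp

-- unrolling one level of A's recursion
theorem pvALoop_expand (cs : List String) (n : Int) (k : Nat) (p : String) :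
    pvALoop cs p n (k + 1) []
      = (PySem.List.pyRange 0 n 1).flatMap
          (fun i => pvALoop cs (p ++ PySem.List.pyGetD cs i "") n k []) := by
  show (PySem.List.pyRange 0 n 1).foldl _ [] = _
  rw [PySem.List.foldl_congr_mem _ _
        (fun a i => a ++ pvALoop cs (p ++ PySem.List.pyGetD cs i "") n k []) []
        (fun a i _ => pvALoop_acc cs n k _ a),
      pvFoldl_shift]
  simp

-- one frontier step written as a flatMap
theorem pvBStep_eq_flatMap (cs : List String) (n : Int) (fr : List String) :
    pvBStep cs n fr = fr.flatMap (fun p =>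
      (PySem.List.pyRange 0 n 1).map (fun i => p ++ PySem.List.pyGetD cs i "")) := by
  unfold pvBStep
  rw [PySem.List.foldl_congr_mem _ _
        (fun acc p => acc ++ (PySem.List.pyRange 0 n 1).map
            (fun i => p ++ PySem.List.pyGetD cs i "")) []
        (fun acc p _ => PySem.List.foldl_append_singleton_eq_map _ _ _),
      PySem.List.foldl_append_eq_flatMap]
  simp

-- B's frontier iteration, from any starting frontier, is level-k expansion of each element
theorem pvBIter_flatMap (cs : List String) (n : Int) :
    ∀ (k : Nat) (L : List String),
      pvBIter cs n k L = L.flatMap (fun p => pvALoop cs p n k []) := by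
  intro k
  induction k with
  | zero => intro L; simp [pvBIter, pvALoop]
  | succ k' ih =>
    intro L
    show (if L = [] then L else pvBIter cs n k' (pvBStep cs n L)) = _
    by_cases hL : L = []
    · simp [hL]
    · rw [if_neg hL, ih, pvBStep_eq_flatMap, List.flatMap_assoc]
      refine List.flatMap_congr (fun p _ => ?_)
      rw [List.flatMap_map, pvALoop_expand]

-- ===== VERDICT (by name: the statement is the Claim_ definition above) =====
theorem possiblestringsRec_spec : Claim_equal_possiblestringsRec := by
  intro cs p n k acc _ _
  unfold Spec_possiblestringsRec possiblestringsRec possiblestringsRec_alt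
  by_cases hk : k = 0
  · simp [hk]
  · simp only [hk, ite_false]
    rw [pvBIter_flatMap]
    simp [pvALoop_acc cs n k.toNat p acc]
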